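-- pv_equiv track=rewrite | github.com/KaioGabriel-the/Algoritmo | bee/beepy/bee1188.py | inferior
-- ===== SOURCE A (Python) =====
-- def inferior(matriz,):
--     elementos = []
--     for l in range(len(matriz)):
--         for c in range(len(matriz[l])):
--             if (l == c or (l+c) == (len(matriz)-1)) and l == len(matriz) // 2:
--                 elemento = matriz[l][c]
--                 elementos.append(elemento)
--
--     return elementos
-- ===== SOURCE B (Python) =====
-- def inferior(matriz):
--     n = len(matriz)
--     if n == 0:
--         return []
--     m = n // 2
--     row = matriz[m]
--     cols = [m] if n % 2 == 1 else [n - 1 - m, m]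
--     return [row[c] for c in cols if c < len(row)]
-- ===== Notes on version B (the rewrite author's own statement) =====
-- stated objective: faster
-- what changed: A scans every cell of the matrix with two nested loops testing the diagonal/anti-diagonal/middle-row condition; B computes the middle row index m = n//2 once and directly reads that row's two matching columns (m and n-1-m, in column order), so only one row is touched.
import Mathlib
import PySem

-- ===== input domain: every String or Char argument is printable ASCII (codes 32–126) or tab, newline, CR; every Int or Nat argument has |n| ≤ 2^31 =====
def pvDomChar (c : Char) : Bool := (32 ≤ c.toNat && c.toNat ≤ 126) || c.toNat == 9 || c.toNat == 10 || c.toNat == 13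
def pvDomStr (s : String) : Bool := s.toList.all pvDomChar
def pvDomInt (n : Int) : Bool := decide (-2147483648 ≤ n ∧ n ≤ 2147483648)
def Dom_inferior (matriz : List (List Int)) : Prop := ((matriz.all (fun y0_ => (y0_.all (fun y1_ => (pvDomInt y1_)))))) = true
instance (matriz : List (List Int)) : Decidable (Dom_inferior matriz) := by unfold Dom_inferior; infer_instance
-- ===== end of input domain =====

-- B replaces A's scan of the whole matrix by direct indexing of the two relevant
-- columns of the middle row (objective: faster, O(1) row accesses instead of O(n*m)).

-- ===== PORT A =====
def inferior (matriz : List (List Int)) : List Int :=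
  (PySem.List.pyRange 0 (matriz.length : Int) 1).foldl (fun elementos l =>
    (PySem.List.pyRange 0 ((PySem.List.pyGetD matriz l []).length : Int) 1).foldl
      (fun elementos c =>
        if (l == c || l + c == (matriz.length : Int) - 1)
            && (l == PySem.Int.floordiv (matriz.length : Int) 2)
        then elementos ++ [PySem.List.pyGetD (PySem.List.pyGetD matriz l []) c 0]
        else elementos)
      elementos) []

-- ===== PORT B =====
def inferior_alt (matriz : List (List Int)) : List Int :=
  if (matriz.length : Int) == 0 then []
  else
    let n : Int := (matriz.length : Int)
    let m : Int := PySem.Int.floordiv n 2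
    let row : List Int := PySem.List.pyGetD matriz m []
    let cols : List Int := if PySem.Int.mod n 2 == 1 then [m] else [n - 1 - m, m]
    (cols.filter (fun c => c < (row.length : Int))).map
      (fun c => PySem.List.pyGetD row c 0)

-- ===== PRECONDITION & SPEC =====
def Spec_inferior (matriz : List (List Int)) (out : List Int) : Prop := out = inferior_alt matriz
instance (matriz : List (List Int)) (out : List Int) : Decidable (Spec_inferior matriz out) := by unfold Spec_inferior; infer_instance

-- ===== CLAIM (what is proved, stated in full; the proofs are below) =====
def Claim_equal_inferior : Prop := ∀ (matriz : List (List Int)), Dom_inferior matriz → Spec_inferior matriz (inferior matriz)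

-- ===== LEMMAS AND PROOFS =====

-- filtering a range for a single target value
lemma filter_range_single (x : Int) (hx : 0 ≤ x) (N : Nat) :
    (PySem.List.pyRange 0 (N : Int) 1).filter (fun c => c == x)
      = if x < (N : Int) then [x] else [] := by
  induction N with
  | zero => simp [PySem.List.pyRange_one_eq_nil]; omega
  | succ N ih =>
      rw [show ((N + 1 : Nat) : Int) = (N : Int) + 1 by push_cast; ring,
        PySem.List.pyRange_one_succ_right (a := 0) (b := (N : Int)) (by omega),
        List.filter_append, ih]
      by_cases h2 : x = (N : Int)
      · simp [h2, show (N : Int) < (N : Int) + 1 by omega]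
      · have hNx : ((N : Int) == x) = false := by simp [Ne.symm h2]
        simp [hNx, show x < (N : Int) + 1 ↔ x < (N : Int) by omega]

-- filtering a range for two target values x < y (result in increasing order)
lemma filter_range_pair (x y : Int) (hx : 0 ≤ x) (hxy : x < y) (N : Nat) :
    (PySem.List.pyRange 0 (N : Int) 1).filter (fun c => c == x || c == y)
      = (if x < (N : Int) then [x] else []) ++ (if y < (N : Int) then [y] else []) := by
  induction N with
  | zero => simp [PySem.List.pyRange_one_eq_nil]; omega
  | succ N ih =>
      rw [show ((N + 1 : Nat) : Int) = (N : Int) + 1 by push_cast; ring,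
        PySem.List.pyRange_one_succ_right (a := 0) (b := (N : Int)) (by omega),
        List.filter_append, ih]
      by_cases h3 : x = (N : Int)
      · simp [h3, show ¬ y < (N : Int) by omega,
          show (N : Int) < (N : Int) + 1 by omega, show ¬ y < (N : Int) + 1 by omega]
      · by_cases h4 : y = (N : Int)
        · simp [show ((N : Int) == x) = false by simp [Ne.symm h3], h4,
            show x < (N : Int) by omega,
            show x < (N : Int) + 1 by omega, show (N : Int) < (N : Int) + 1 by omega]
        · simp [show ((N : Int) == x) = false by simp [Ne.symm h3],
            show ((N : Int) == y) = false by simp [Ne.symm h4],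
            show x < (N:Int) + 1 ↔ x < (N:Int) by omega,
            show y < (N:Int) + 1 ↔ y < (N:Int) by omega]

-- A's double loop, written as a flatMap of filtered column ranges
lemma inferior_eq_flatMap (matriz : List (List Int)) :
    inferior matriz =
      (PySem.List.pyRange 0 (matriz.length : Int) 1).flatMap (fun l =>
        ((PySem.List.pyRange 0 ((PySem.List.pyGetD matriz l []).length : Int) 1).filter
            (fun c => (l == c || l + c == (matriz.length : Int) - 1)
              && (l == PySem.Int.floordiv (matriz.length : Int) 2))).map
          (fun c => PySem.List.pyGetD (PySem.List.pyGetD matriz l []) c 0)) := by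
  unfold inferior
  have h := PySem.List.foldl_congr_mem (PySem.List.pyRange 0 (matriz.length : Int) 1)
      (fun elementos l =>
        (PySem.List.pyRange 0 ((PySem.List.pyGetD matriz l []).length : Int) 1).foldl
          (fun elementos c =>
            if (l == c || l + c == (matriz.length : Int) - 1)
                && (l == PySem.Int.floordiv (matriz.length : Int) 2)
            then elementos ++ [PySem.List.pyGetD (PySem.List.pyGetD matriz l []) c 0]
            else elementos)
          elementos)
      (fun elementos l => elementos ++
        ((PySem.List.pyRange 0 ((PySem.List.pyGetD matriz l []).length : Int) 1).filter
            (fun c => (l == c || l + c == (matriz.length : Int) - 1)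
              && (l == PySem.Int.floordiv (matriz.length : Int) 2))).map
          (fun c => PySem.List.pyGetD (PySem.List.pyGetD matriz l []) c 0))
      [] (fun acc l _ => PySem.List.foldl_append_if _ _ _ _)
  rw [h, PySem.List.foldl_append_eq_flatMap]
  simp

-- ===== VERDICT (by name: the statement is the Claim_ definition above) =====
theorem inferior_spec : Claim_equal_inferior := by
  intro matriz _
  unfold Spec_inferior
  rcases Nat.eq_zero_or_pos matriz.length with h0 | hpos
  · rw [inferior_eq_flatMap]
    simp [inferior_alt, h0, PySem.List.pyRange_one_eq_nil]
  · -- the matrix is nonempty; A's double loop collapses to the middle row's two columns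
    set n : Int := (matriz.length : Int) with hn
    set m : Int := PySem.Int.floordiv n 2 with hmdef
    have hm : m = n / 2 := PySem.Int.floordiv_eq_ediv_of_pos (by omega)
    have hm0 : 0 ≤ m := by omega
    have hmn : m < n := by omega
    set row : List Int := PySem.List.pyGetD matriz m [] with hrow
    set L : Int := (row.length : Int) with hL
    have hL0 : 0 ≤ L := by positivity
    -- A's flatMap has empty terms at every l ≠ m
    rw [inferior_eq_flatMap,
      PySem.List.pyRange_one_append 0 m n hm0 (le_of_lt hmn),
      PySem.List.pyRange_one_cons hmn, List.flatMap_append, List.flatMap_cons]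
    have hleft : (PySem.List.pyRange 0 m).flatMap (fun l =>
        ((PySem.List.pyRange 0 ((PySem.List.pyGetD matriz l []).length : Int)).filter
            (fun c => (l == c || l + c == n - 1) && (l == m))).map
          (fun c => PySem.List.pyGetD (PySem.List.pyGetD matriz l []) c 0)) = [] := by
      rw [List.flatMap_eq_nil_iff]
      intro l hl
      have hlm : l < m := ((PySem.List.mem_pyRange_one).1 hl).2
      have : ∀ c, ((l == c || l + c == n - 1) && (l == m)) = false := by
        intro c; simp; omega
      simp [this]
    have hright : (PySem.List.pyRange (m + 1) n).flatMap (fun l =>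
        ((PySem.List.pyRange 0 ((PySem.List.pyGetD matriz l []).length : Int)).filter
            (fun c => (l == c || l + c == n - 1) && (l == m))).map
          (fun c => PySem.List.pyGetD (PySem.List.pyGetD matriz l []) c 0)) = [] := by
      rw [List.flatMap_eq_nil_iff]
      intro l hl
      have hlm : m + 1 ≤ l := ((PySem.List.mem_pyRange_one).1 hl).1
      have : ∀ c, ((l == c || l + c == n - 1) && (l == m)) = false := by
        intro c; simp; omega
      simp [this]
    rw [hleft, hright]
    -- the single surviving term, at l = m
    by_cases hodd : PySem.Int.mod n 2 == 1
    · -- odd size: the two target columns coincide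
      have hparity : n = 2 * m + 1 := by
        have := PySem.Int.mod_eq_emod_of_pos (a := n) (b := 2) (by omega)
        simp at hodd
        omega
      have hcongr : List.filter
            (fun c => (m == c || m + c == n - 1) && (m == m))
            (PySem.List.pyRange 0 L)
          = List.filter (fun c => c == m) (PySem.List.pyRange 0 L) := by
        apply List.filter_congr
        intro c _
        rw [Bool.eq_iff_iff]
        simp
        omega
      rw [hcongr]
      rw [filter_range_single m hm0 row.length]
      simp only [inferior_alt, ← hn, ← hmdef, ← hrow, hodd, if_true]
      by_cases hmL : m < (row.length : Int) <;> simp [hmL] <;> omega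
    · -- even size: two distinct target columns n-1-m < m
      have hparity : n = 2 * m := by
        have := PySem.Int.mod_eq_emod_of_pos (a := n) (b := 2) (by omega)
        simp at hodd
        omega
      have hm1 : 1 ≤ m := by omega
      have hcongr : List.filter
            (fun c => (m == c || m + c == n - 1) && (m == m))
            (PySem.List.pyRange 0 L)
          = List.filter (fun c => c == n - 1 - m || c == m) (PySem.List.pyRange 0 L) := by
        apply List.filter_congr
        intro c _
        rw [Bool.eq_iff_iff]
        simp
        omega
      rw [hcongr]
      rw [filter_range_pair (n - 1 - m) m (by omega) (by omega) row.length]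
      simp only [inferior_alt, ← hn, ← hmdef, ← hrow, hodd]
      by_cases h1 : n - 1 - m < (row.length : Int) <;>
        by_cases h2 : m < (row.length : Int) <;>
          simp [h1, h2, List.filter] <;> omega
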